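-- pv_equiv track=rewrite | github.com/ShadowClarks/keylogger | decrypt_logs.py | clean_keylog
-- ===== SOURCE A (Python) =====
-- def clean_keylog(text):
--     replacements = {
--         "Key.space": " ",
--         "Key.enter": "\n",
--         "Key.tab": "\t",
--         "Key.backspace": "[BACKSPACE]",
--         "Key.ctrl": "",
--         "Key.cmd": "",
--         "Key.shift": "",
--         "Key.alt": "",
--         "Key.caps_lock": "",
--         "Key.esc": "",
--     }
--     for key, val in replacements.items():
--         text = text.replace(key, val)
--     return text
-- ===== SOURCE B (Python) =====
-- import re
--
-- _REPLACEMENTS = {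
--     "Key.space": " ",
--     "Key.enter": "\n",
--     "Key.tab": "\t",
--     "Key.backspace": "[BACKSPACE]",
--     "Key.ctrl": "",
--     "Key.cmd": "",
--     "Key.shift": "",
--     "Key.alt": "",
--     "Key.caps_lock": "",
--     "Key.esc": "",
-- }
--
-- _PATTERN = re.compile("|".join(re.escape(k) for k in _REPLACEMENTS))
--
--
-- def clean_keylog(text):
--     return _PATTERN.sub(lambda m: _REPLACEMENTS[m.group(0)], text)
-- ===== Notes on version B (the rewrite author's own statement) =====
-- stated objective: idiomatic
-- what changed: B compiles one regex alternation of the ten key tokens and rewrites the text in a single left-to-right pass via dict lookup, instead of A's ten sequential full-string replace passes.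
-- outside the precondition, e.g. on clean_keylog('KeKey.ctrly.esc'): A returns '', B returns 'Key.esc'
import Mathlib
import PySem

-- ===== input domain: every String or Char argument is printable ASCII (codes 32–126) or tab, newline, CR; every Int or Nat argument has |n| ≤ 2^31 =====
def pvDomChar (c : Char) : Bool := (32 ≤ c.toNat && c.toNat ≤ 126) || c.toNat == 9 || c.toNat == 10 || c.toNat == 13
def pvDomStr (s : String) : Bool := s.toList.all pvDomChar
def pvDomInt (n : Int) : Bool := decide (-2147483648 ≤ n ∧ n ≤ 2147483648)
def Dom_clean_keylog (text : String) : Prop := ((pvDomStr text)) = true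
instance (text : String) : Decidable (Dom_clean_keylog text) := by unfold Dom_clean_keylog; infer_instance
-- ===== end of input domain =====

-- B replaces A's ten sequential full-string replace passes by one left-to-right scan
-- (the port of Source B's single compiled regex alternation + dict lookup); objective: idiomatic.

-- ===== PORT A =====
def pvReplacementsA : List (String × String) :=
  [("Key.space", " "), ("Key.enter", "\n"), ("Key.tab", "\t"),
   ("Key.backspace", "[BACKSPACE]"), ("Key.ctrl", ""), ("Key.cmd", ""),
   ("Key.shift", ""), ("Key.alt", ""), ("Key.caps_lock", ""), ("Key.esc", "")]

def clean_keylog (text : String) : String :=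
  pvReplacementsA.foldl (fun t kv => PySem.Str.replace t kv.1 kv.2) text

-- ===== PORT B =====
-- Source B's own replacement table (keys in the dict order the alternation is built in).
def pvTblB : List (List Char × List Char) :=
  [("Key.space".toList, " ".toList), ("Key.enter".toList, "\n".toList), ("Key.tab".toList, "\t".toList),
   ("Key.backspace".toList, "[BACKSPACE]".toList), ("Key.ctrl".toList, "".toList), ("Key.cmd".toList, "".toList),
   ("Key.shift".toList, "".toList), ("Key.alt".toList, "".toList), ("Key.caps_lock".toList, "".toList),
   ("Key.esc".toList, "".toList)]

-- Hand port of re.compile("|".join(re.escape(k)…)).sub(lambda m: repl[m.group(0)], text):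
-- a regex of literal alternatives substitutes at the leftmost match position, trying the
-- alternatives in the order they were joined; this scan is exact for that pattern.
def pvScan : List Char → List Char
  | [] => []
  | c :: t =>
    match pvTblB.find? (fun pv => pv.1.isPrefixOf (c :: t)) with
    | some pv => pv.2 ++ pvScan (List.drop (pv.1.length - 1) t)
    | none => c :: pvScan t
termination_by s => s.length
decreasing_by
  all_goals simp [List.length_drop]

def clean_keylog_alt (text : String) : String := String.ofList (pvScan text.toList)

-- ===== PRECONDITION & SPEC =====
-- Pre_ excludes texts containing a partial key token immediately followed by a token that A
-- deletes (e.g. "KeKey.ctrly.esc"): deleting the inner token fuses its surroundings into a new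
-- token, which A's later sequential passes replace again while B's single pass leaves it — an
-- artefact of multi-pass vs one-pass substitution on which either answer is defensible.
def pvIsBadAt (t : List Char) : Bool :=
  pvTblB.any fun pv =>
    pvTblB.any fun pv' =>
      pv'.2.isEmpty && ((List.range pv.1.length).any fun j =>
        decide (0 < j) && (pv.1.take j ++ pv'.1).isPrefixOf t)

def pvHasBad : List Char → Bool
  | [] => false
  | c :: t => pvIsBadAt (c :: t) || pvHasBad t

def Pre_clean_keylog (text : String) : Prop := pvHasBad text.toList = false
instance (text : String) : Decidable (Pre_clean_keylog text) := by unfold Pre_clean_keylog; infer_instance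

def pvWitness_clean_keylog : String := "aKey.space b"

def Spec_clean_keylog (text : String) (out : String) : Prop := out = clean_keylog_alt text
instance (text : String) (out : String) : Decidable (Spec_clean_keylog text out) := by unfold Spec_clean_keylog; infer_instance

-- ===== CLAIM (what is proved, stated in full; the proofs are below) =====
def Claim_equal_clean_keylog : Prop := ∀ (text : String), Dom_clean_keylog text → Pre_clean_keylog text → Spec_clean_keylog text (clean_keylog text)

-- ===== LEMMAS AND PROOFS =====

lemma pvDneKeys : ∀ pv ∈ pvTblB, pv.1 ≠ [] := by decide

-- the excluded patterns, as a list: a proper nonempty prefix of a key followed by a deleted key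
def pvDelKeys : List (List Char) := (pvTblB.filter (fun pv => pv.2.isEmpty)).map Prod.fst

def pvBadPats : List (List Char) :=
  pvTblB.flatMap (fun pv =>
    (pv.1.inits.filter (fun a => !a.isEmpty && a != pv.1)).flatMap
      (fun a => pvDelKeys.map (fun d => a ++ d)))

lemma pvBadPats_elim {b : List Char} (hb : b ∈ pvBadPats) :
    ∃ pv ∈ pvTblB, ∃ pv' ∈ pvTblB, pv'.2.isEmpty ∧
      ∃ j, 0 < j ∧ j < pv.1.length ∧ b = pv.1.take j ++ pv'.1 := by
  simp only [pvBadPats, pvDelKeys, List.mem_flatMap, List.mem_filter, List.mem_inits,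
    List.mem_map, Bool.and_eq_true, Bool.not_eq_true', bne_iff_ne, ne_eq] at hb
  obtain ⟨pv, hpv, a, ⟨ha, hane, hap⟩, d, ⟨⟨pv', hpv'd, hdel⟩, rfl⟩⟩ := hb
  refine ⟨pv, hpv, pv', hpv'd.1, hpv'd.2, a.length, ?_, ?_, ?_⟩
  · cases a with
    | nil => simp at hane
    | cons _ _ => simp
  · have hle := ha.length_le
    rcases lt_or_eq_of_le hle with h | h
    · exact h
    · exact absurd (ha.eq_of_length h) hap
  · rw [← List.prefix_iff_eq_take.mp ha, hdel]

lemma pvIsBadAt_of {u : List Char} {pv pv' : List Char × List Char}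
    (hpv : pv ∈ pvTblB) (hpv' : pv' ∈ pvTblB) (hdel : pv'.2.isEmpty) {j : Nat}
    (hj0 : 0 < j) (hjlt : j < pv.1.length) (hpre : (pv.1.take j ++ pv'.1) <+: u) :
    pvIsBadAt u = true := by
  unfold pvIsBadAt
  simp only [List.any_eq_true, Bool.and_eq_true, decide_eq_true_eq, List.mem_range,
    List.isPrefixOf_iff_prefix]
  exact ⟨pv, hpv, pv', hpv', hdel, j, hjlt, hj0, hpre⟩

lemma pvHasBad_suffix : ∀ (t u : List Char), u <:+ t → pvHasBad t = false → u ≠ [] →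
    pvIsBadAt u = false := by
  intro t
  induction t with
  | nil =>
    intro u hu _ hne
    exact absurd (List.suffix_nil.mp hu) hne
  | cons c t ih =>
    intro u hu h hne
    have h' : pvIsBadAt (c :: t) = false ∧ pvHasBad t = false := by
      have : (pvIsBadAt (c :: t) || pvHasBad t) = false := h
      simpa [Bool.or_eq_false_iff] using this
    rcases List.suffix_cons_iff.mp hu with rfl | hu'
    · exact h'.1
    · exact ih u hu' h'.2 hne

lemma pv_pre_patternFree {t : List Char} (h : pvHasBad t = false) :
    ∀ b ∈ pvBadPats, ¬ b <:+: t := by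
  intro b hb hinf
  obtain ⟨pv, hpv, pv', hpv', hdel, j, hj0, hjlt, rfl⟩ := pvBadPats_elim hb
  obtain ⟨u, hbu, hut⟩ := List.infix_iff_prefix_suffix.mp hinf
  have hbne : (pv.1.take j ++ pv'.1) ≠ [] := by
    intro hEq
    exact pvDneKeys pv' hpv' (List.append_eq_nil_iff.mp hEq).2
  have hune : u ≠ [] := by
    intro h0
    subst h0
    exact hbne (List.prefix_nil.mp hbu)
  have hbad : pvIsBadAt u = true :=
    pvIsBadAt_of hpv hpv' (by simpa using hdel) hj0 hjlt hbu
  rw [pvHasBad_suffix t u hut h hune] at hbad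
  exact Bool.false_ne_true hbad


-- Structural reformulation of PySem.Chars.replace (nonempty pattern): fuel-free recursion.
def pvRepF (old new : List Char) : List Char → List Char
  | [] => []
  | c :: t =>
    if old.isPrefixOf (c :: t) then new ++ pvRepF old new (List.drop (old.length - 1) t)
    else c :: pvRepF old new t
termination_by s => s.length
decreasing_by
  all_goals simp [List.length_drop]

def pvSeq (rs : List (List Char × List Char)) (s : List Char) : List Char :=
  rs.foldl (fun t kv => pvRepF kv.1 kv.2 t) s

lemma pvRepF_nil (old new : List Char) : pvRepF old new [] = [] := by
  simp [pvRepF]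

lemma pvRepF_cons_neg (old new : List Char) (c : Char) (t : List Char)
    (h : ¬ old <+: c :: t) : pvRepF old new (c :: t) = c :: pvRepF old new t := by
  rw [pvRepF, if_neg (by simpa [List.isPrefixOf_iff_prefix] using h)]

lemma pvRepF_match (old new u : List Char) (h : old ≠ []) :
    pvRepF old new (old ++ u) = new ++ pvRepF old new u := by
  obtain ⟨c, t, rfl⟩ := List.exists_cons_of_ne_nil h
  rw [List.cons_append, pvRepF, if_pos (by simp [List.isPrefixOf_iff_prefix])]
  simp [List.drop_left']

lemma pv_go_spec (old new : List Char) (hold : old ≠ []) :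
    ∀ (fuel : Nat) (l acc : List Char), l.length ≤ fuel →
      PySem.Chars.replace.go old new fuel l acc = acc.reverse ++ pvRepF old new l := by
  intro fuel
  induction fuel with
  | zero =>
    intro l acc h
    have hl : l = [] := List.eq_nil_of_length_eq_zero (Nat.le_zero.mp h)
    subst hl
    rw [PySem.Chars.replace.go.eq_def]
    simp [pvRepF_nil]
  | succ n ih =>
    intro l acc h
    cases l with
    | nil => rw [PySem.Chars.replace.go.eq_def]; simp [pvRepF_nil]
    | cons c t =>
      rw [PySem.Chars.replace.go.eq_def]
      by_cases hp : old.isPrefixOf (c :: t)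
      · simp only [hp, if_true]
        obtain ⟨o, o', rfl⟩ := List.exists_cons_of_ne_nil hold
        have hlen : (List.drop (o :: o').length (c :: t)).length ≤ n := by
          simp at h ⊢; omega
        rw [ih _ _ hlen]
        have hdrop : List.drop (o :: o').length (c :: t) = List.drop ((o :: o').length - 1) t := by
          simp
        rw [hdrop, pvRepF, if_pos hp]
        simp
      · simp only [hp]
        have hlen : t.length ≤ n := by simp at h; omega
        rw [ih _ _ hlen]
        rw [pvRepF_cons_neg _ _ _ _ (by simpa [List.isPrefixOf_iff_prefix] using hp)]
        simp

lemma pv_replace_eq (s old new : List Char) (h : old ≠ []) :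
    PySem.Chars.replace s old new = pvRepF old new s := by
  unfold PySem.Chars.replace
  rw [if_neg (by simpa using h)]
  rw [pv_go_spec old new h s.length s [] le_rfl]
  simp

-- replace distributes over a prefix free of matches
lemma pvRepF_skip (old new : List Char) :
    ∀ (x u : List Char), (∀ q < x.length, ¬ old <+: List.drop q x ++ u) →
      pvRepF old new (x ++ u) = x ++ pvRepF old new u := by
  intro x
  induction x with
  | nil => simp
  | cons c x' ih =>
    intro u H
    have h0 : ¬ old <+: c :: (x' ++ u) := by
      have := H 0 (by simp)
      simpa using this
    rw [List.cons_append, pvRepF_cons_neg _ _ _ _ h0,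
        ih u (fun q hq => by
          have := H (q + 1) (by simp; omega)
          simpa using this)]
    simp

lemma pvRepF_id (old new : List Char) (s : List Char)
    (H : ∀ q, ¬ old <+: List.drop q s) : pvRepF old new s = s := by
  induction s with
  | nil => exact pvRepF_nil _ _
  | cons c t ih =>
    rw [pvRepF_cons_neg _ _ _ _ (by simpa using H 0),
        ih (fun q => by simpa using H (q + 1))]

lemma pvSeq_cons (pv : List Char × List Char) (rs : List (List Char × List Char)) (s : List Char) :
    pvSeq (pv :: rs) s = pvSeq rs (pvRepF pv.1 pv.2 s) := rfl

lemma pvSeq_split (pre post : List (List Char × List Char)) (pv : List Char × List Char) (s : List Char) :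
    pvSeq (pre ++ pv :: post) s = pvSeq post (pvRepF pv.1 pv.2 (pvSeq pre s)) := by
  simp [pvSeq, List.foldl_append]

lemma pvSeq_skip :
    ∀ (rs : List (List Char × List Char)) (x u : List Char),
      (∀ pv ∈ rs, ∀ q < x.length, ∀ w, ¬ pv.1 <+: List.drop q x ++ w) →
      pvSeq rs (x ++ u) = x ++ pvSeq rs u := by
  intro rs
  induction rs with
  | nil => simp [pvSeq]
  | cons pv rs' ih =>
    intro x u HX
    rw [pvSeq_cons, pvSeq_cons,
        pvRepF_skip _ _ x u (fun q hq => HX pv (List.mem_cons_self) q hq u)]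
    exact ih x _ (fun pv' h q hq w => HX pv' (List.mem_cons_of_mem _ h) q hq w)

lemma pvSeq_id (s : List Char) :
    ∀ (rs : List (List Char × List Char)),
      (∀ pv ∈ rs, ∀ q, ¬ pv.1 <+: List.drop q s) → pvSeq rs s = s := by
  intro rs
  induction rs with
  | nil => intro _; rfl
  | cons pv rs' ih =>
    intro H
    rw [pvSeq_cons, pvRepF_id _ _ _ (H pv (List.mem_cons_self))]
    exact ih (fun pv' h q => H pv' (List.mem_cons_of_mem _ h) q)

lemma pvSeq_nil : ∀ (rs : List (List Char × List Char)), pvSeq rs [] = [] := by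
  intro rs
  induction rs with
  | nil => rfl
  | cons pv rs' ih => rw [pvSeq_cons, pvRepF_nil]; exact ih

-- pvScan equations
lemma pvScan_nil : pvScan [] = [] := by rw [pvScan]

lemma pvScan_cons_none (c : Char) (t : List Char)
    (h : pvTblB.find? (fun pv => pv.1.isPrefixOf (c :: t)) = none) :
    pvScan (c :: t) = c :: pvScan t := by
  rw [pvScan, h]

lemma pvScan_cons_some (c : Char) (t : List Char) (pv : List Char × List Char)
    (h : pvTblB.find? (fun pv => pv.1.isPrefixOf (c :: t)) = some pv) :
    pvScan (c :: t) = pv.2 ++ pvScan (List.drop (pv.1.length - 1) t) := by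
  rw [pvScan, h]

lemma pvScan_id : ∀ (s : List Char),
    (∀ q, ∀ pv ∈ pvTblB, ¬ pv.1 <+: List.drop q s) → pvScan s = s := by
  intro s
  induction s with
  | nil => intro _; exact pvScan_nil
  | cons c t ih =>
    intro H
    rw [pvScan_cons_none c t (List.find?_eq_none.mpr (fun pv h => by
      simp only [List.isPrefixOf_iff_prefix]
      simpa using H 0 pv h))]
    rw [ih (fun q pv h => by simpa using H (q + 1) pv h)]

lemma pvScan_skip :
    ∀ (x z : List Char),
      (∀ q < x.length, ∀ pv ∈ pvTblB, ¬ pv.1 <+: List.drop q x ++ z) →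
      pvScan (x ++ z) = x ++ pvScan z := by
  intro x
  induction x with
  | nil => simp
  | cons c x' ih =>
    intro z H
    have h0 : ∀ pv ∈ pvTblB, ¬ pv.1 <+: c :: (x' ++ z) := fun pv h => by
      have := H 0 (by simp) pv h
      simpa using this
    rw [List.cons_append, pvScan_cons_none c (x' ++ z) (List.find?_eq_none.mpr (fun pv h => by
      simp only [List.isPrefixOf_iff_prefix]
      exact h0 pv h))]
    rw [ih z (fun q hq pv h => by
      have := H (q + 1) (by simp; omega) pv h
      simpa using this)]
    simp

-- decidable table facts
lemma pvDnodup : (pvTblB.map Prod.fst).Nodup := by decide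
set_option maxRecDepth 10000 in
lemma pvDpairwise : ∀ pv ∈ pvTblB, ∀ pv' ∈ pvTblB, pv.1 ≠ pv'.1 → ¬ pv.1 <+: pv'.1 := by decide
lemma pvDnoK : ∀ pv ∈ pvTblB, 'K' ∉ pv.1.drop 1 := by decide
lemma pvDheadK : ∀ pv ∈ pvTblB, pv.1.head? = some 'K' := by decide
lemma pvDvalHeadB : (pvTblB.all fun pv => pvTblB.all fun pv' =>
    (pv.2.take 1).all fun c => !(pv'.1.contains c)) = true := by rfl

lemma pvDvalHead : ∀ pv ∈ pvTblB, ∀ pv' ∈ pvTblB, ∀ c ∈ pv.2.take 1, c ∉ pv'.1 := by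
  have h := pvDvalHeadB
  simp only [List.all_eq_true, Bool.not_eq_true', List.contains_eq_mem,
    decide_eq_false_iff_not] at h
  exact h
lemma pvDdel : ∀ pv ∈ pvTblB, pv.2 = [] → pv.1 ∈ pvDelKeys := by decide
lemma pvDlen2 : ∀ pv ∈ pvTblB, 2 ≤ pv.1.length := by decide

def pvFragList : List (List Char) :=
  pvTblB.flatMap (fun pv => (pv.1.drop 1).tails ++ pv.2.tails)

set_option maxRecDepth 10000 in
lemma pvDfragMF : ∀ pv ∈ pvTblB, ∀ z ∈ pvFragList,
    z = [] ∨ (z.length = 1 ∧ pv.1.take 1 ≠ z.take 1) ∨ (2 ≤ z.length ∧ pv.1.take 2 ≠ z.take 2) := by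
  decide

lemma pv_take_eq_of_prefix {p z w : List Char} (h : p <+: z ++ w) (k : Nat)
    (hk : k ≤ p.length) (hz : k ≤ z.length) : p.take k = z.take k := by
  obtain ⟨r, hr⟩ := h
  calc p.take k = (p ++ r).take k := (List.take_append_of_le_length hk).symm
    _ = (z ++ w).take k := by rw [hr]
    _ = z.take k := List.take_append_of_le_length hz

lemma pv_frag_no_key {pv : List Char × List Char} (hpv : pv ∈ pvTblB) {z : List Char}
    (hz : z ∈ pvFragList) (hne : z ≠ []) (w : List Char) : ¬ pv.1 <+: z ++ w := by
  intro h
  rcases pvDfragMF pv hpv z hz with h0 | ⟨h1, hne1⟩ | ⟨h2, hne2⟩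
  · exact hne h0
  · exact hne1 (pv_take_eq_of_prefix h 1 (by have := pvDlen2 pv hpv; omega) (by omega))
  · exact hne2 (pv_take_eq_of_prefix h 2 (pvDlen2 pv hpv) h2)

lemma pv_frag_of_key_suffix {pv : List Char × List Char} (hpv : pv ∈ pvTblB) {z : List Char}
    (h : z <:+ pv.1.drop 1) : z ∈ pvFragList := by
  simp only [pvFragList, List.mem_flatMap]
  exact ⟨pv, hpv, List.mem_append_left _ ((List.mem_tails _ _).mpr h)⟩

lemma pv_frag_of_val_suffix {pv : List Char × List Char} (hpv : pv ∈ pvTblB) {z : List Char}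
    (h : z <:+ pv.2) : z ∈ pvFragList := by
  simp only [pvFragList, List.mem_flatMap]
  exact ⟨pv, hpv, List.mem_append_right _ ((List.mem_tails _ _).mpr h)⟩

lemma pv_badPats_mem {a k : List Char} {pv : List Char × List Char} (hpv : pv ∈ pvTblB)
    (ha : a <+: pv.1) (hane : a ≠ []) (hap : a ≠ pv.1) (hk : k ∈ pvDelKeys) :
    a ++ k ∈ pvBadPats := by
  simp only [pvBadPats, List.mem_flatMap, List.mem_filter, List.mem_inits, List.mem_map]
  refine ⟨pv, hpv, a, ⟨ha, ?_⟩, k, hk, rfl⟩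
  simp [hane, hap]

-- small prefix/head helpers
lemma pv_prefix_head {b z w : List Char} (h : b <+: z ++ w) (hb : b ≠ []) (hz : z ≠ []) :
    b.head? = z.head? := by
  obtain ⟨r, hr⟩ := h
  cases b with
  | nil => exact absurd rfl hb
  | cons b0 b' =>
    cases z with
    | nil => exact absurd rfl hz
    | cons z0 z' =>
      have : b0 = z0 := by
        have := congrArg List.head? hr
        simpa using this
      simp [this]

lemma pv_head_mem {l : List Char} {c : Char} (h : l.head? = some c) : c ∈ l := by
  cases l with
  | nil => simp at h
  | cons a t => simp at h; simp [h]

lemma pv_drop_one_subset {p : List Char} {j : Nat} (hj : 1 ≤ j) :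
    List.drop j p ⊆ List.drop 1 p := by
  have : List.drop j p = List.drop (j - 1) (List.drop 1 p) := by
    rw [List.drop_drop]; congr 1; omega
  rw [this]; exact List.drop_subset _ _

lemma pv_drop_suffix_drop {p : List Char} {j : Nat} (hj : 1 ≤ j) :
    List.drop j p <:+ List.drop 1 p := by
  have : List.drop j p = List.drop (j - 1) (List.drop 1 p) := by
    rw [List.drop_drop]; congr 1; omega
  rw [this]; exact List.drop_suffix _ _

-- ===== main induction =====
lemma pv_main : ∀ (n : Nat) (s : List Char), s.length ≤ n →
    (∀ b ∈ pvBadPats, ¬ b <:+: s) → pvSeq pvTblB s = pvScan s := by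
  intro n
  induction n with
  | zero =>
    intro s hs _
    have : s = [] := List.eq_nil_of_length_eq_zero (Nat.le_zero.mp hs)
    subst this
    rw [pvSeq_nil, pvScan_nil]
  | succ n ih =>
    intro s hslen hPF
    by_cases hocc : ∃ q, ∃ pv ∈ pvTblB, pv.1 <+: List.drop q s
    · -- leftmost occurrence
      set q0 := Nat.find hocc with hq0def
      obtain ⟨pv, hpv, hk⟩ := Nat.find_spec hocc
      obtain ⟨y, hy⟩ := hk
      have hkne : pv.1 ≠ [] := pvDneKeys pv hpv
      set x := List.take q0 s with hxdef
      have hq0le : q0 ≤ s.length := by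
        by_contra hlt
        push Not at hlt
        rw [List.drop_eq_nil_of_le (le_of_lt hlt)] at hy
        exact hkne (List.eq_nil_of_append_eq_nil hy).1
      have hxlen : x.length = q0 := by simp [hxdef]; omega
      have hs : s = x ++ (pv.1 ++ y) := by rw [hxdef, hy, List.take_append_drop]
      have hL : ∀ q < q0, ∀ pv' ∈ pvTblB, ¬ pv'.1 <+: List.drop q s :=
        fun q hq pv' h1 h2 => Nat.find_min hocc hq ⟨pv', h1, h2⟩
      have hdq : ∀ q < q0, List.drop q s = List.drop q x ++ (pv.1 ++ y) := by
        intro q hq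
        conv_lhs => rw [hs]
        rw [List.drop_append_of_le_length (by omega)]
      -- q<|x| obligation, middle = pv.1 (the matched key)
      have hOa : ∀ pv' ∈ pvTblB, ∀ q < x.length, ∀ w, ¬ pv'.1 <+: List.drop q x ++ (pv.1 ++ w) := by
        intro pv' hpv' q hq w h
        have hxq : q < q0 := by omega
        have hane : List.drop q x ≠ [] := by
          have : 0 < (List.drop q x).length := by simp; omega
          exact List.ne_nil_of_length_pos this
        rcases le_or_gt pv'.1.length (List.drop q x).length with hle | hgt
        · have h1 : pv'.1 <+: List.drop q x :=
            List.prefix_of_prefix_length_le h (List.prefix_append _ _) hle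
          exact hL q hxq pv' hpv' (by rw [hdq q hxq]; exact h1.trans (List.prefix_append _ _))
        · have haP : List.drop q x <+: pv'.1 :=
            List.prefix_of_prefix_length_le (List.prefix_append _ _) h (le_of_lt hgt)
          by_cases heq : List.drop q x = pv'.1
          · exact hL q hxq pv' hpv' (by rw [hdq q hxq, ← heq]; exact List.prefix_append _ _)
          · obtain ⟨b, hb⟩ := haP
            have hbne : b ≠ [] := by
              intro h0; rw [h0, List.append_nil] at hb; exact heq hb
            have hbpre : b <+: pv.1 ++ w := by
              rw [← hb] at h
              exact (List.prefix_append_right_inj _).mp h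
            have hbh : b.head? = some 'K' := by
              rw [pv_prefix_head hbpre hbne hkne]
              exact pvDheadK pv hpv
            have hKb : 'K' ∈ b := pv_head_mem hbh
            have hbsub : b ⊆ pv'.1.drop 1 := by
              have hbd : b = List.drop (List.drop q x).length pv'.1 := by
                rw [← hb]; exact List.drop_left.symm
            
              have : 1 ≤ (List.drop q x).length := by
                cases hzc : List.drop q x with
                | nil => exact absurd hzc hane
                | cons _ _ => simp
              rw [hbd]
              exact pv_drop_one_subset this
            exact pvDnoK pv' hpv' (hbsub hKb)
      -- q<|x| obligation, middle = pv.2 (the value)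
      have hOv : ∀ pv' ∈ pvTblB, ∀ q < x.length, ∀ w, ¬ pv'.1 <+: List.drop q x ++ (pv.2 ++ w) := by
        intro pv' hpv' q hq w h
        have hxq : q < q0 := by omega
        have hane : List.drop q x ≠ [] := by
          have : 0 < (List.drop q x).length := by simp; omega
          exact List.ne_nil_of_length_pos this
        rcases le_or_gt pv'.1.length (List.drop q x).length with hle | hgt
        · have h1 : pv'.1 <+: List.drop q x :=
            List.prefix_of_prefix_length_le h (List.prefix_append _ _) hle
          exact hL q hxq pv' hpv' (by rw [hdq q hxq]; exact h1.trans (List.prefix_append _ _))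
        · have haP : List.drop q x <+: pv'.1 :=
            List.prefix_of_prefix_length_le (List.prefix_append _ _) h (le_of_lt hgt)
          by_cases heq : List.drop q x = pv'.1
          · exact hL q hxq pv' hpv' (by rw [hdq q hxq, ← heq]; exact List.prefix_append _ _)
          · obtain ⟨b, hb⟩ := haP
            have hbne : b ≠ [] := by
              intro h0; rw [h0, List.append_nil] at hb; exact heq hb
            have hbpre : b <+: pv.2 ++ w := by
              rw [← hb] at h
              exact (List.prefix_append_right_inj _).mp h
            cases hv : pv.2 with
            | nil =>
              have hdel : pv.1 ∈ pvDelKeys := pvDdel pv hpv hv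
              have hbad : (List.drop q x ++ pv.1) ∈ pvBadPats :=
                pv_badPats_mem hpv' ⟨b, hb⟩ hane heq hdel
              apply hPF _ hbad
              exact List.infix_iff_prefix_suffix.mpr
                ⟨List.drop q s, by rw [hdq q hxq, ← List.append_assoc]; exact List.prefix_append _ _,
                 List.drop_suffix _ _⟩
            | cons v0 v' =>
              have hbh : b.head? = some v0 := by
                rw [pv_prefix_head hbpre hbne (by simp [hv])]
                simp [hv]
              have hv0b : v0 ∈ b := pv_head_mem hbh
              have hbsub : b ⊆ pv'.1 := by
                have hbd : b = List.drop (List.drop q x).length pv'.1 := by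
                  rw [← hb]; exact List.drop_left.symm
                rw [hbd]
                exact List.drop_subset _ _
              exact pvDvalHead pv hpv pv' hpv' v0 (by simp [hv]) (hbsub hv0b)
      -- inside-key obligations
      have hOk2 : ∀ pv' ∈ pvTblB, ∀ j, 1 ≤ j → j < pv.1.length → ∀ w,
          ¬ pv'.1 <+: List.drop j pv.1 ++ w := by
        intro pv' hpv' j hj1 hjlt w
        have hz : List.drop j pv.1 ∈ pvFragList :=
          pv_frag_of_key_suffix hpv (pv_drop_suffix_drop hj1)
        have hne : List.drop j pv.1 ≠ [] := by
          have : 0 < (List.drop j pv.1).length := by simp; omega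
          exact List.ne_nil_of_length_pos this
        exact pv_frag_no_key hpv' hz hne w
      have hOk0 : ∀ pv' ∈ pvTblB, pv'.1 ≠ pv.1 → ∀ w, ¬ pv'.1 <+: pv.1 ++ w := by
        intro pv' hpv' hne w h
        rcases le_or_gt pv'.1.length pv.1.length with hle | hgt
        · exact pvDpairwise pv' hpv' pv hpv hne
            (List.prefix_of_prefix_length_le h (List.prefix_append _ _) hle)
        · exact pvDpairwise pv hpv pv' hpv' (fun he => hne he.symm)
            (List.prefix_of_prefix_length_le (List.prefix_append _ _) h (le_of_lt hgt))
      -- inside-value obligations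
      have hOv2 : ∀ pv' ∈ pvTblB, ∀ j, j < pv.2.length → ∀ w,
          ¬ pv'.1 <+: List.drop j pv.2 ++ w := by
        intro pv' hpv' j hjlt w
        have hz : List.drop j pv.2 ∈ pvFragList :=
          pv_frag_of_val_suffix hpv (List.drop_suffix _ _)
        have hne : List.drop j pv.2 ≠ [] := by
          have : 0 < (List.drop j pv.2).length := by simp; omega
          exact List.ne_nil_of_length_pos this
        exact pv_frag_no_key hpv' hz hne w
      -- table split
      obtain ⟨pre, post, htbl⟩ := List.append_of_mem hpv
      have hknotpre : ∀ pv' ∈ pre, pv'.1 ≠ pv.1 := by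
        intro pv' hpv' he
        have hnd := pvDnodup
        rw [htbl] at hnd
        simp only [List.map_append, List.map_cons] at hnd
        rw [List.nodup_middle, List.nodup_cons] at hnd
        have := hnd.1
        exact this (List.mem_append_left _ (by rw [← he]; exact List.mem_map_of_mem hpv'))
      have hpresub : ∀ pv' ∈ pre, pv' ∈ pvTblB := by
        intro pv' h; rw [htbl]; exact List.mem_append_left _ h
      have hpostsub : ∀ pv' ∈ post, pv' ∈ pvTblB := by
        intro pv' h; rw [htbl]; exact List.mem_append_right _ (List.mem_cons_of_mem _ h)
      -- sequential side
      have hseq : pvSeq pvTblB s = x ++ (pv.2 ++ pvSeq pvTblB y) := by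
        conv_lhs => rw [htbl, hs]
        rw [pvSeq_split]
        have hX1 : ∀ pv' ∈ pre, ∀ q < (x ++ pv.1).length, ∀ w,
            ¬ pv'.1 <+: List.drop q (x ++ pv.1) ++ w := by
          intro pv' hpv' q hq w
          have hpv'T := hpresub pv' hpv'
          rcases lt_or_ge q x.length with hqx | hqx
          · rw [List.drop_append_of_le_length (le_of_lt hqx), List.append_assoc]
            exact hOa pv' hpv'T q hqx w
          · have hj : q - x.length < pv.1.length := by
              simp only [List.length_append] at hq; omega
            have hdropeq : List.drop q (x ++ pv.1) = List.drop (q - x.length) pv.1 := by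
              rw [show q = x.length + (q - x.length) by omega, List.drop_append]
              simp
            rw [hdropeq]
            rcases Nat.eq_zero_or_pos (q - x.length) with h0 | h1
            · rw [h0, List.drop_zero]
              exact hOk0 pv' hpv'T (hknotpre pv' hpv') w
            · exact hOk2 pv' hpv'T _ h1 hj w
        have e1 : pvSeq pre (x ++ (pv.1 ++ y)) = x ++ (pv.1 ++ pvSeq pre y) := by
          have h := pvSeq_skip pre (x ++ pv.1) y hX1
          simpa only [List.append_assoc] using h
        have e2 : pvRepF pv.1 pv.2 (x ++ (pv.1 ++ pvSeq pre y)) =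
            x ++ (pv.2 ++ pvRepF pv.1 pv.2 (pvSeq pre y)) := by
          rw [pvRepF_skip _ _ x _ (fun q hq => hOa pv hpv q hq (pvSeq pre y)),
              pvRepF_match _ _ _ hkne]
        have hX3 : ∀ pv' ∈ post, ∀ q < (x ++ pv.2).length, ∀ w,
            ¬ pv'.1 <+: List.drop q (x ++ pv.2) ++ w := by
          intro pv' hpv' q hq w
          have hpv'T := hpostsub pv' hpv'
          rcases lt_or_ge q x.length with hqx | hqx
          · rw [List.drop_append_of_le_length (le_of_lt hqx), List.append_assoc]
            exact hOv pv' hpv'T q hqx w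
          · have hj : q - x.length < pv.2.length := by
              simp only [List.length_append] at hq; omega
            have hdropeq : List.drop q (x ++ pv.2) = List.drop (q - x.length) pv.2 := by
              rw [show q = x.length + (q - x.length) by omega, List.drop_append]
              simp
            rw [hdropeq]
            exact hOv2 pv' hpv'T _ hj w
        have e3 : pvSeq post (x ++ (pv.2 ++ pvRepF pv.1 pv.2 (pvSeq pre y))) =
            x ++ (pv.2 ++ pvSeq post (pvRepF pv.1 pv.2 (pvSeq pre y))) := by
          have h := pvSeq_skip post (x ++ pv.2) (pvRepF pv.1 pv.2 (pvSeq pre y)) hX3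
          simpa only [List.append_assoc] using h
        have e4 : pvSeq post (pvRepF pv.1 pv.2 (pvSeq pre y)) = pvSeq pvTblB y := by
          rw [htbl, pvSeq_split]
        rw [e1, e2, e3, e4]
      -- scan side
      have hfind : pvTblB.find? (fun pv' => pv'.1.isPrefixOf (pv.1 ++ y)) = some pv := by
        rw [htbl, List.find?_append]
        have hnone : pre.find? (fun pv' => pv'.1.isPrefixOf (pv.1 ++ y)) = none := by
          apply List.find?_eq_none.mpr
          intro pv' hpv'
          simp only [List.isPrefixOf_iff_prefix]
          exact hOk0 pv' (hpresub pv' hpv') (hknotpre pv' hpv') y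
        rw [hnone, Option.none_or, List.find?_cons_of_pos]
        simp [List.isPrefixOf_iff_prefix]
      have hscan : pvScan s = x ++ (pv.2 ++ pvScan y) := by
        conv_lhs => rw [hs]
        rw [pvScan_skip x _ (fun q hq pv' hpv' => by
          have hxq : q < q0 := by omega
          have := hL q hxq pv' hpv'
          rw [hdq q hxq] at this
          exact this)]
        obtain ⟨c, k', hck⟩ := List.exists_cons_of_ne_nil hkne
        have hky : pv.1 ++ y = c :: (k' ++ y) := by rw [hck, List.cons_append]
        rw [hky] at hfind ⊢
        rw [pvScan_cons_some c (k' ++ y) pv hfind]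
        have hdy : List.drop (pv.1.length - 1) (k' ++ y) = y := by
          rw [hck]; simp [List.drop_left']
        rw [hdy]
      -- recurse
      have hylen : y.length ≤ n := by
        have h1 : s.length = x.length + (pv.1.length + y.length) := by
          rw [hs]; simp
        have h2 : 1 ≤ pv.1.length := by
          cases hzc : pv.1 with
          | nil => exact absurd hzc hkne
          | cons _ _ => simp
        omega
      have hyPF : ∀ b ∈ pvBadPats, ¬ b <:+: y := by
        intro b hb hinf
        apply hPF b hb
        have hysuf : y <:+ s := by
          have : y = List.drop (q0 + pv.1.length) s := by
            rw [← List.drop_drop, ← hy, List.drop_left]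
          rw [this]; exact List.drop_suffix _ _
        exact hinf.trans hysuf.isInfix
      rw [hseq, hscan, ih y hylen hyPF]
    · -- no occurrence anywhere
      push Not at hocc
      rw [pvSeq_id s pvTblB (fun pv h q => hocc q pv h),
          pvScan_id s (fun q pv h => hocc q pv h)]

-- bridge for port A
lemma pvA_toList : ∀ (rsS : List (String × String)), (∀ pv ∈ rsS, pv.1.toList ≠ []) →
    ∀ (t : String),
      (List.foldl (fun t kv => PySem.Str.replace t kv.1 kv.2) t rsS).toList =
        pvSeq (rsS.map fun kv => (kv.1.toList, kv.2.toList)) t.toList := by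
  intro rsS
  induction rsS with
  | nil => intro _ t; simp [pvSeq]
  | cons kv rs ih =>
    intro h t
    simp only [List.foldl_cons, List.map_cons]
    rw [ih (fun pv hm => h pv (List.mem_cons_of_mem _ hm)) (PySem.Str.replace t kv.1 kv.2),
        pvSeq_cons]
    congr 1
    rw [PySem.Str.toList_replace]
    exact pv_replace_eq _ _ _ (h kv (List.mem_cons_self))

set_option maxRecDepth 10000 in
lemma pvTbl_eq : pvReplacementsA.map (fun kv => (kv.1.toList, kv.2.toList)) = pvTblB := by decide

-- ===== VERDICT (by name: the statement is the Claim_ definition above) =====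
theorem clean_keylog_spec : Claim_equal_clean_keylog := by
  unfold Claim_equal_clean_keylog
  intro text _ hpre
  unfold Spec_clean_keylog
  rw [← String.toList_inj]
  have hA : (clean_keylog text).toList = pvSeq pvTblB text.toList := by
    have := pvA_toList pvReplacementsA (by decide) text
    rw [pvTbl_eq] at this
    simpa [clean_keylog] using this
  have hB : (clean_keylog_alt text).toList = pvScan text.toList := by
    simp [clean_keylog_alt]
  rw [hA, hB]
  exact pv_main text.toList.length text.toList le_rfl (pv_pre_patternFree hpre)
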